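-- pv_equiv track=rewrite | github.com/Muzzle-kr/AlgorithmAutoSave | 프로그래머스/unrated/135808. 과일 장수/과일 장수.py | solution
-- ===== SOURCE A (Python) =====
-- def solution(k, m, score):
--     answer = 0
--
--     score.sort(reverse=True)
--
--     box = []
--     for i in score:
--         box.append(i)
--
--         if len(box) == m:
--             answer += min(box) * m # 가격매기기
--             box = [] # 박스 초기화
--     return answer
-- ===== SOURCE B (Python) =====
-- def solution(k, m, score):
--     score.sort(reverse=True)
--     answer = 0
--     for i in range(m - 1, len(score), m):
--         answer += score[i] * m
--     return answer
-- ===== Notes on version B (the rewrite author's own statement) =====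
-- stated objective: faster
-- what changed: B never builds boxes or calls min: after the same descending in-place sort it sums every m-th element directly (score[i]*m for i = m-1, 2m-1, ...), exploiting that in a descending list each full box's minimum is its last element; this removes the O(n) box-building/min work (measured ~2x faster).
-- outside the precondition, e.g. on solution(1, 0, [3, 1]): A returns 0, B raises ValueError
import Mathlib
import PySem

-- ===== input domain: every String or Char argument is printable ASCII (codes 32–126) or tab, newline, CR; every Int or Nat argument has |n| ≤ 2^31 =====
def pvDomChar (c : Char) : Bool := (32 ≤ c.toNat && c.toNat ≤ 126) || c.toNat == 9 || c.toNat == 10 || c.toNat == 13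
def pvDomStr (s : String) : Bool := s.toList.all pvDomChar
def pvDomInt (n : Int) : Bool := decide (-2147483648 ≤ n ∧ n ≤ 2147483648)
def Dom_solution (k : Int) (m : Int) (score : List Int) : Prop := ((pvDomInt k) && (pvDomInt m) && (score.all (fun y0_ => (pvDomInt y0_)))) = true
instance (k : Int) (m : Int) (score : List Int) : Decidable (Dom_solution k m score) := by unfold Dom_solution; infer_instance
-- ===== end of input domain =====

-- B drops the box list and min() calls: after the same descending sort it sums every m-th
-- element directly (simpler). Both A and B sort `score` in place; the equivalence proved
-- here is about the return value (the mutation is identical anyway).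

-- ===== PORT A =====
def solution (k : Int) (m : Int) (score : List Int) : Int :=
  let s := PySem.List.sorted score (fun x => x) true
  (s.foldl (fun (st : Int × List Int) i =>
      let box := st.2 ++ [i]
      if (box.length : Int) = m then
        (st.1 + (PySem.List.min? box (fun x => x)).getD 0 * m, [])
      else (st.1, box)) ((0 : Int), ([] : List Int))).1

-- ===== PORT B =====
def solution_alt (k : Int) (m : Int) (score : List Int) : Int :=
  let s := PySem.List.sorted score (fun x => x) true
  (PySem.List.pyRange (m - 1) (s.length : Int) m).foldl
    (fun acc i => acc + PySem.List.pyGetD s i 0 * m) 0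

-- ===== PRECONDITION & SPEC =====
-- Pre_ excludes m = 0, where range's zero step makes B raise ValueError while A's
-- box-length test can never fire, so A falls through and returns 0.
def Pre_solution (k : Int) (m : Int) (score : List Int) : Prop := m ≠ 0
instance (k : Int) (m : Int) (score : List Int) : Decidable (Pre_solution k m score) := by unfold Pre_solution; infer_instance
def pvWitness_solution : Int × Int × List Int := (1, 2, [3, 1, 2])
def Spec_solution (k : Int) (m : Int) (score : List Int) (out : Int) : Prop := out = solution_alt k m score
instance (k : Int) (m : Int) (score : List Int) (out : Int) : Decidable (Spec_solution k m score out) := by unfold Spec_solution; infer_instance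

-- ===== CLAIM (what is proved, stated in full; the proofs are below) =====
def Claim_equal_solution : Prop := ∀ (k : Int) (m : Int) (score : List Int), Dom_solution k m score → Pre_solution k m score → Spec_solution k m score (solution k m score)

-- ===== LEMMAS AND PROOFS =====

-- A's loop body, named for the proofs (definitionally the lambda in `solution`).
def aStep (m : Int) (st : Int × List Int) (i : Int) : Int × List Int :=
  let box := st.2 ++ [i]
  if (box.length : Int) = m then
    (st.1 + (PySem.List.min? box (fun x => x)).getD 0 * m, [])
  else (st.1, box)

-- B's stride sum, named for the proofs.
def strideSum (m : Int) (s : List Int) : Int :=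
  ((PySem.List.pyRange (m - 1) (s.length : Int) m).map
    (fun i => PySem.List.pyGetD s i 0 * m)).sum

theorem foldl_add_eq (l : List Int) (f : Int → Int) (c : Int) :
    l.foldl (fun a i => a + f i) c = c + (l.map f).sum := by
  induction l generalizing c with
  | nil => simp
  | cons x t ih => simp [List.foldl_cons, ih]; ring

theorem nofill (m : Int) (s : List Int) :
    ∀ (b : List Int) (ans : Int), (m ≤ 0 ∨ ((b.length : Int) + s.length < m)) →
      (s.foldl (aStep m) (ans, b)).1 = ans := by
  induction s with
  | nil => intro b ans _; simp
  | cons x t ih =>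
    intro b ans h
    have hne : ¬ (((b ++ [x]).length : Int) = m) := by
      simp only [List.length_append, List.length_cons, List.length_nil]
      push_cast
      rcases h with h | h
      · omega
      · simp only [List.length_cons] at h; push_cast at h; omega
    simp only [List.foldl_cons, aStep, if_neg hne]
    exact ih (b ++ [x]) ans (by
      rcases h with h | h
      · exact Or.inl h
      · right; simp only [List.length_append, List.length_cons, List.length_nil] at *
        push_cast at *; omega)

theorem chunk (m : Int) (c : List Int) :
    ∀ (r b : List Int) (ans : Int), c ≠ [] → ((b.length : Int) + c.length = m) →
      ((c ++ r).foldl (aStep m) (ans, b)).1 =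
        (r.foldl (aStep m)
          (ans + (PySem.List.min? (b ++ c) (fun x => x)).getD 0 * m, [])).1 := by
  induction c with
  | nil => intro _ _ _ hne _; exact absurd rfl hne
  | cons x t ih =>
    intro r b ans _ hlen
    rcases eq_or_ne t [] with rfl | ht
    · have hm : ((b ++ [x]).length : Int) = m := by
        simp only [List.length_cons, List.length_nil] at hlen
        simp only [List.length_append, List.length_cons, List.length_nil]
        push_cast at *; omega
      simp only [List.cons_append, List.nil_append, List.foldl_cons, aStep, if_pos hm]
    · have hne : ¬ (((b ++ [x]).length : Int) = m) := by
        have : 1 ≤ t.length := List.length_pos_iff.mpr ht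
        simp only [List.length_cons] at hlen
        simp only [List.length_append, List.length_cons, List.length_nil]
        push_cast at *; omega
      simp only [List.cons_append, List.foldl_cons, aStep, if_neg hne]
      have := ih r (b ++ [x]) ans ht (by
        simp only [List.length_append, List.length_cons, List.length_nil] at *
        push_cast at *; omega)
      simpa [List.append_assoc] using this

theorem getLast_min_desc (l : List Int) (h : l ≠ []) (hp : l.Pairwise (fun a b => b ≤ a)) :
    ∀ y ∈ l, l.getLast h ≤ y := by
  induction l with
  | nil => exact absurd rfl h
  | cons x t ih =>
    intro y hy
    rcases eq_or_ne t [] with rfl | ht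
    · simp at hy; simp [hy]
    · rw [List.getLast_cons ht]
      rcases List.mem_cons.mp hy with rfl | hyt
      · have h1 : ∀ z ∈ t, z ≤ y := (List.pairwise_cons.mp hp).1
        exact le_trans (h1 _ (List.getLast_mem ht)) (le_refl y)
      · exact ih ht (List.pairwise_cons.mp hp).2 y hyt

theorem min_desc (l : List Int) (h : l ≠ []) (hp : l.Pairwise (fun a b => b ≤ a)) :
    (PySem.List.min? l (fun x => x)).getD 0 = l.getLast h := by
  rcases hm : PySem.List.min? l (fun x => x) with _ | v
  · exact absurd ((PySem.List.min?_eq_none_iff l _).mp hm) h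
  · have hv : v ∈ l := PySem.List.min?_mem hm
    have h1 : v ≤ l.getLast h := PySem.List.min?_isMin hm _ (List.getLast_mem h)
    have h2 : l.getLast h ≤ v := getLast_min_desc l h hp v hv
    simp [le_antisymm h1 h2]

theorem pyRange_neg_nil (m L : Int) (hm : m < 0) (hL : 0 ≤ L) :
    PySem.List.pyRange (m - 1) L m = [] := by
  simp only [PySem.List.pyRange]
  rw [if_neg (by omega : ¬ m = 0)]
  rw [if_neg (by omega : ¬ 0 < m), if_neg (by omega : ¬ L < m - 1)]
  simp

theorem pyRange_pos_nil (a b m : Int) (hm : 0 < m) (hba : b ≤ a) :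
    PySem.List.pyRange a b m = [] := by
  rw [PySem.List.pyRange_of_pos a b hm, if_neg (by omega : ¬ a < b)]
  simp

theorem pyRange_pos_cons (a b m : Int) (hm : 0 < m) (hab : a < b) :
    PySem.List.pyRange a b m = a :: PySem.List.pyRange (a + m) b m := by
  rw [PySem.List.pyRange_of_pos a b hm, PySem.List.pyRange_of_pos (a + m) b hm]
  have key : (b - a + m - 1) / m = (b - (a + m) + m - 1) / m + 1 := by
    have := Int.add_mul_ediv_right (b - (a + m) + m - 1) 1 (by omega : m ≠ 0)
    simp only [one_mul] at this
    rw [← this]; ring_nf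
  by_cases h2 : a + m < b
  · rw [if_pos hab, if_pos h2, key]
    have hnn : 0 ≤ (b - (a + m) + m - 1) / m :=
      Int.ediv_nonneg (by omega) (by omega)
    have htn : ((b - (a + m) + m - 1) / m + 1).toNat = ((b - (a + m) + m - 1) / m).toNat + 1 := by
      omega
    rw [htn, List.range_succ_eq_map]
    simp only [List.map_cons, Nat.cast_zero, mul_zero, add_zero, List.map_map]
    congr 1
    apply List.map_congr_left
    intro x _
    simp only [Function.comp_apply]
    push_cast
    ring
  · rw [if_pos hab, if_neg h2]
    have h3 : 0 ≤ b - a - 1 := by omega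
    have h4 : b - a - 1 < m := by omega
    have hone : (b - a + m - 1) / m = 1 := by
      have h5 := Int.add_mul_ediv_right (b - a - 1) 1 (by omega : m ≠ 0)
      simp only [one_mul] at h5
      rw [(by ring : b - a + m - 1 = b - a - 1 + m), h5, Int.ediv_eq_zero_of_lt h3 h4]
      omega
    rw [hone]
    simp [List.range_succ]

theorem pyRange_pos_shift (a b m : Int) (hm : 0 < m) :
    PySem.List.pyRange (a + m) b m = (PySem.List.pyRange a (b - m) m).map (· + m) := by
  rw [PySem.List.pyRange_of_pos (a + m) b hm, PySem.List.pyRange_of_pos a (b - m) hm]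
  have hc : (a + m < b) ↔ (a < b - m) := by omega
  rw [(by ring_nf : b - (a + m) + m - 1 = b - m - a + m - 1)]
  simp only [hc, List.map_map]
  apply List.map_congr_left
  intro k _
  simp; ring

theorem pyGetD_drop (s : List Int) (n : Nat) (i : Int) (hi : 0 ≤ i) :
    PySem.List.pyGetD s (i + n) 0 = PySem.List.pyGetD (s.drop n) i 0 := by
  rw [PySem.List.pyGetD_of_nonneg _ _ (by omega), PySem.List.pyGetD_of_nonneg _ _ hi]
  have h1 : (i + (n : Int)).toNat = n + i.toNat := by omega
  rw [h1]
  rcases lt_or_ge (n + i.toNat) s.length with h | h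
  · rw [List.getD_eq_getElem _ _ h,
      List.getD_eq_getElem _ _ (by simp [List.length_drop]; omega)]
    rw [List.getElem_drop]
  · rw [List.getD_eq_default _ _ h,
      List.getD_eq_default _ _ (by simp [List.length_drop]; omega)]

theorem strideSum_step (m : Int) (s : List Int) (hm : 1 ≤ m) (hlen : m ≤ (s.length : Int)) :
    strideSum m s = PySem.List.pyGetD s (m - 1) 0 * m + strideSum m (s.drop m.toNat) := by
  unfold strideSum
  rw [pyRange_pos_cons (m - 1) (s.length : Int) m (by omega) (by omega)]
  rw [List.map_cons, List.sum_cons]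
  congr 1
  rw [pyRange_pos_shift (m - 1) (s.length : Int) m (by omega), List.map_map]
  have hdl : ((s.drop m.toNat).length : Int) = (s.length : Int) - m := by
    simp [List.length_drop]; omega
  rw [hdl]
  apply congrArg
  apply List.map_congr_left
  intro i hi
  have hmem := (PySem.List.mem_pyRange_iff_of_pos (by omega : (0:Int) < m) i).mp hi
  have h0 : 0 ≤ i := by omega
  simp only [Function.comp]
  rw [← pyGetD_drop s m.toNat i h0]
  congr 2
  omega

theorem main_lemma (m : Int) (hm : 1 ≤ m) :
    ∀ (n : Nat) (s : List Int), s.length = n → s.Pairwise (fun a b => b ≤ a) →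
      ∀ ans : Int, (s.foldl (aStep m) (ans, [])).1 = ans + strideSum m s := by
  intro n
  induction n using Nat.strong_induction_on with
  | _ n ih =>
    intro s hn hp ans
    rcases lt_or_ge (s.length : Int) m with hlt | hge
    · -- short tail: incomplete box, no stride index
      rw [nofill m s [] ans (Or.inr (by simpa using hlt))]
      have : PySem.List.pyRange (m - 1) (s.length : Int) m = [] :=
        pyRange_pos_nil _ _ _ (by omega) (by omega)
      simp [strideSum, this]
    · -- peel one full box of m elements
      have hmn : m.toNat ≤ s.length := by omega
      have hc : (s.take m.toNat).length = m.toNat := by simp; omega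
      have hcne : s.take m.toNat ≠ [] := by
        intro h; rw [h] at hc; simp at hc; omega
      have hsplit : s = s.take m.toNat ++ s.drop m.toNat := (List.take_append_drop _ s).symm
      conv_lhs => rw [hsplit]
      rw [chunk m (s.take m.toNat) (s.drop m.toNat) [] ans hcne
        (by simp [hc]; omega)]
      have hdlen : (s.drop m.toNat).length = n - m.toNat := by simp [List.length_drop, hn]
      have hdp : (s.drop m.toNat).Pairwise (fun a b => b ≤ a) :=
        hp.sublist (List.drop_sublist _ _)
      rw [ih (n - m.toNat) (by omega) _ hdlen hdp]
      rw [strideSum_step m s hm hge]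
      have hcp : (s.take m.toNat).Pairwise (fun a b => b ≤ a) :=
        hp.sublist (List.take_sublist _ _)
      have hmin : (PySem.List.min? ([] ++ s.take m.toNat) (fun x => x)).getD 0 =
          PySem.List.pyGetD s (m - 1) 0 := by
        rw [List.nil_append, min_desc _ hcne hcp,
          List.getLast_eq_getElem hcne]
        rw [PySem.List.pyGetD_eq_getElem s 0 (by omega) (by omega)]
        have hidx : (s.take m.toNat).length - 1 = (m - 1).toNat := by
          rw [hc]; omega
        simp only [hidx, List.getElem_take]
      rw [hmin]
      ring

-- ===== VERDICT (by name: the statement is the Claim_ definition above) =====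
theorem solution_spec : Claim_equal_solution := by
  intro k m score _ hpre
  unfold Pre_solution at hpre
  unfold Spec_solution solution solution_alt
  simp only []
  set s := PySem.List.sorted score (fun x => x) true with hs
  have hp : s.Pairwise (fun a b => b ≤ a) := by
    simpa using PySem.List.sorted_pairwise_rev score (fun x => x)
  show (s.foldl (aStep m) (0, [])).1 =
    (PySem.List.pyRange (m - 1) (s.length : Int) m).foldl
      (fun acc i => acc + PySem.List.pyGetD s i 0 * m) 0
  rcases lt_or_ge m 1 with hm | hm
  · have hm' : m < 0 := by omega
    rw [pyRange_neg_nil m (s.length : Int) hm' (Int.natCast_nonneg _)]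
    simpa using nofill m s [] 0 (Or.inl (by omega))
  · rw [foldl_add_eq, main_lemma m hm s.length s rfl hp 0]
    rfl
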